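-- pv_equiv track=rewrite | github.com/lu-zero/riscv-unified-db | ext/auto-instr/db.py | make_pseudo_list
-- ===== SOURCE A (Python) =====
-- def make_pseudo_list(inst_dict):
--     '''
--     This function goes through the instruction dictionary (inst_dict),
--     finds the original instructions and their corresponding pseudoinstructions,
--     and prints a list in the format: originalinstruction: pseudoinstruction
--     '''
--     # Initialize a dictionary to store the relationships
--     pseudo_map = {}
--
--     # Iterate through the instruction dictionary
--     for original_instr_name, original_instr_data in inst_dict.items():
--
--         original_instruction = original_instr_name
--
--         # Iterate again to compare with other instructions
--         for instr_name, instr_data in inst_dict.items():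
--             if 'original_instruction' in instr_data and original_instruction == instr_data['original_instruction']:
--                 # Add the instruction to the dictionary
--                 if original_instruction not in pseudo_map:
--                     pseudo_map[original_instruction] = []
--                 pseudo_map[original_instruction].append(instr_name)
--     return pseudo_map
-- ===== SOURCE B (Python) =====
-- def make_pseudo_list(inst_dict):
--     # One pass: group pseudoinstruction names by their 'original_instruction',
--     # then emit the groups keyed by inst_dict's keys in original order.
--     groups = {}
--     for instr_name, instr_data in inst_dict.items():
--         orig = instr_data.get('original_instruction')
--         if orig is not None:
--             groups.setdefault(orig, []).append(instr_name)
--     return {name: groups[name] for name in inst_dict if name in groups}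
-- ===== Notes on version B (the rewrite author's own statement) =====
-- stated objective: faster
-- what changed: Replaced the nested scan (for every key, rescan the whole dict for matching 'original_instruction') by a single grouping pass into a dict of lists followed by one ordered emission pass.
import Mathlib
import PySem

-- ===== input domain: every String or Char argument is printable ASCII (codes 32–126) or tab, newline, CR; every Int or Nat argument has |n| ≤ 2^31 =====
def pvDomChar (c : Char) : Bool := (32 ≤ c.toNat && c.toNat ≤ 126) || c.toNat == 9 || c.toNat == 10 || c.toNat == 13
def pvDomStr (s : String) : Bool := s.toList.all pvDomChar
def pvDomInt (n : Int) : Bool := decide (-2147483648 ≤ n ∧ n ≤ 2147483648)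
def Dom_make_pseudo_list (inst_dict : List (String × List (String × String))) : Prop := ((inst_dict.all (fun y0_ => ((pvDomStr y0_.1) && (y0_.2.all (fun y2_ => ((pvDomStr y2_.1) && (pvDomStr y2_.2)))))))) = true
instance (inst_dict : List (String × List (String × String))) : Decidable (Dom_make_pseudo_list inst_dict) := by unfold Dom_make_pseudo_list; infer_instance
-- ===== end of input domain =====

-- B replaces A's quadratic nested rescan by one grouping pass plus one ordered emission pass (faster, asymptotic).

-- ===== PORT A =====
-- A: for every key, rescan the whole dict for entries whose 'original_instruction' equals that key,
-- appending matches into pseudo_map ('ensure key then append' = Dict.modify with default []).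
def make_pseudo_list (inst_dict : List (String × List (String × String))) : List (String × List String) :=
  (inst_dict.foldl
    (fun pseudo_map p =>
      inst_dict.foldl
        (fun pm q =>
          -- `'original_instruction' in instr_data and original_instruction == instr_data['original_instruction']`
          if (PySem.Dict.mk q.2).get? "original_instruction" = some p.1 then
            -- `if original_instruction not in pseudo_map: pseudo_map[...] = []` then `.append(instr_name)`
            pm.modify p.1 [] (fun l => l ++ [q.1])
          else pm)
        pseudo_map)
    PySem.Dict.empty).items

-- ===== PORT B =====
-- B: one pass grouping names by their 'original_instruction' (dict.get, setdefault+append),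
-- then one dict comprehension over inst_dict's keys in original order.
-- the `groups` dict built by Source B's single grouping loop
def pvGroups (inst_dict : List (String × List (String × String))) : PySem.Dict String (List String) :=
  inst_dict.foldl
    (fun g p =>
      match (PySem.Dict.mk p.2).get? "original_instruction" with
      | some orig => g.modify orig [] (fun l => l ++ [p.1])   -- groups.setdefault(orig, []).append(instr_name)
      | none => g)
    PySem.Dict.empty

def make_pseudo_list_alt (inst_dict : List (String × List (String × String))) : List (String × List String) :=
  inst_dict.filterMap (fun p =>
    if (pvGroups inst_dict).contains p.1 then some (p.1, (pvGroups inst_dict).getD p.1 []) else none)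

-- ===== PRECONDITION & SPEC =====
-- The association list encodes a Python dict, whose keys are necessarily distinct; lists with
-- duplicate keys correspond to no Python input, so Pre_ requires the keys to be Nodup.
def Pre_make_pseudo_list (inst_dict : List (String × List (String × String))) : Prop :=
  (inst_dict.map Prod.fst).Nodup
instance (inst_dict : List (String × List (String × String))) : Decidable (Pre_make_pseudo_list inst_dict) := by unfold Pre_make_pseudo_list; infer_instance

def pvWitness_make_pseudo_list : (List (String × List (String × String))) :=
  [("add", [("kind", "base")]), ("mv", [("original_instruction", "add")])]

def Spec_make_pseudo_list (inst_dict : List (String × List (String × String))) (out : List (String × List String)) : Prop := out = make_pseudo_list_alt inst_dict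
instance (inst_dict : List (String × List (String × String))) (out : List (String × List String)) : Decidable (Spec_make_pseudo_list inst_dict out) := by unfold Spec_make_pseudo_list; infer_instance

-- ===== CLAIM (what is proved, stated in full; the proofs are below) =====
def Claim_equal_make_pseudo_list : Prop := ∀ (inst_dict : List (String × List (String × String))), Dom_make_pseudo_list inst_dict → Pre_make_pseudo_list inst_dict → Spec_make_pseudo_list inst_dict (make_pseudo_list inst_dict)

-- ===== LEMMAS AND PROOFS =====

-- the 'original_instruction' field of an entry
def pvOi (q : String × List (String × String)) : Option String :=
  (PySem.Dict.mk q.2).get? "original_instruction"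

-- the names of all entries of L whose 'original_instruction' is k, in order
def pvMatches (L : List (String × List (String × String))) (k : String) : List String :=
  (L.filter (fun q => pvOi q == some k)).map Prod.fst

theorem pvMatches_nil (k : String) : pvMatches [] k = [] := rfl

theorem pvMatches_cons (q : String × List (String × String)) (L : List (String × List (String × String))) (k : String) :
    pvMatches (q :: L) k = if pvOi q = some k then q.1 :: pvMatches L k else pvMatches L k := by
  by_cases h : pvOi q = some k <;> simp [pvMatches, h]

theorem pv_modify_items_not_contains (d : PySem.Dict String (List String)) (k : String)
    (f : List String → List String) (h : d.contains k = false) :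
    (d.modify k [] f).items = d.items ++ [(k, f [])] := by
  rw [PySem.Dict.modify, PySem.Dict.items_insert_of_not_contains (h := h),
    PySem.Dict.getD_of_not_contains (h := h)]

theorem pv_modify_modify (d : PySem.Dict String (List String)) (k : String)
    (f g : List String → List String) :
    (d.modify k [] f).modify k [] g = d.modify k [] (fun v => g (f v)) := by
  simp [PySem.Dict.modify, PySem.Dict.insert_insert_self, PySem.Dict.getD_insert_self]

theorem pv_contains_modify (d : PySem.Dict String (List String)) (k k' : String)
    (f : List String → List String) :
    (d.modify k [] f).contains k' = (k' == k || d.contains k') := by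
  rw [PySem.Dict.modify, PySem.Dict.contains_insert]

-- A's inner loop over the whole dict collects exactly pvMatches L k
theorem pv_inner_fold (L : List (String × List (String × String))) (k : String)
    (pm : PySem.Dict String (List String)) :
    L.foldl (fun pm q => if pvOi q = some k then pm.modify k [] (fun l => l ++ [q.1]) else pm) pm
      = if pvMatches L k = [] then pm else pm.modify k [] (fun l => l ++ pvMatches L k) := by
  induction L generalizing pm with
  | nil => simp [pvMatches_nil]
  | cons q L ih =>
    rw [List.foldl_cons, pvMatches_cons]
    by_cases h : pvOi q = some k
    · simp only [h, if_true, ih, pv_modify_modify]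
      by_cases hm : pvMatches L k = []
      · simp [hm]
      · simp only [hm, List.append_assoc]
        simp
    · simp only [h, if_false, ih]

-- A's outer loop appends one row per key with a non-empty match list, in key order
theorem pv_outer_fold (L P : List (String × List (String × String)))
    (d : PySem.Dict String (List String))
    (h1 : ∀ p ∈ P, d.contains p.1 = false)
    (h2 : (P.map Prod.fst).Nodup) :
    (P.foldl (fun pm p => if pvMatches L p.1 = [] then pm else pm.modify p.1 [] (fun l => l ++ pvMatches L p.1)) d).items
      = d.items ++ P.filterMap (fun p => if pvMatches L p.1 = [] then none else some (p.1, pvMatches L p.1)) := by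
  induction P generalizing d with
  | nil => simp
  | cons p P ih =>
    simp only [List.map_cons, List.nodup_cons] at h2
    rw [List.foldl_cons, List.filterMap_cons]
    by_cases hm : pvMatches L p.1 = []
    · rw [if_pos hm, if_pos hm]
      exact ih d (fun q hq => h1 q (List.mem_cons_of_mem _ hq)) h2.2
    · rw [if_neg hm, if_neg hm,
        ih _ ?_ h2.2, pv_modify_items_not_contains _ _ _ (h1 p (List.mem_cons_self ..))]
      · simp
      · intro q hq
        rw [pv_contains_modify]
        have hne : q.1 ≠ p.1 := by
          intro he
          exact h2.1 (he ▸ List.mem_map_of_mem hq)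
        simp [hne, h1 q (List.mem_cons_of_mem _ hq)]

theorem pvGroups_eq (L : List (String × List (String × String))) :
    pvGroups L = L.foldl (fun g p => match pvOi p with
        | some orig => g.modify orig [] (fun l => l ++ [p.1])
        | none => g) PySem.Dict.empty := rfl

-- B's grouping pass: lookups in `groups` compute pvMatches
theorem pv_groups_getD (L : List (String × List (String × String)))
    (g : PySem.Dict String (List String)) (k : String) :
    (L.foldl (fun g p => match pvOi p with
        | some orig => g.modify orig [] (fun l => l ++ [p.1])
        | none => g) g).getD k []
      = g.getD k [] ++ pvMatches L k := by
  induction L generalizing g with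
  | nil => simp [pvMatches_nil]
  | cons p L ih =>
    rw [List.foldl_cons, pvMatches_cons]
    cases ho : pvOi p with
    | none => rw [ih]; simp
    | some o =>
      simp only [Option.some.injEq]
      rw [ih, PySem.Dict.modify, PySem.Dict.getD_insert]
      by_cases hk : o = k
      · subst hk; simp
      · have hk' : ¬ k = o := fun he => hk he.symm
        simp [hk, hk']

theorem pv_groups_contains (L : List (String × List (String × String)))
    (g : PySem.Dict String (List String)) (k : String) :
    (L.foldl (fun g p => match pvOi p with
        | some orig => g.modify orig [] (fun l => l ++ [p.1])
        | none => g) g).contains k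
      = (g.contains k || !(pvMatches L k).isEmpty) := by
  induction L generalizing g with
  | nil => simp [pvMatches_nil]
  | cons p L ih =>
    rw [List.foldl_cons, pvMatches_cons]
    cases ho : pvOi p with
    | none => rw [ih]; simp
    | some o =>
      simp only [Option.some.injEq]
      rw [ih, pv_contains_modify]
      by_cases hk : o = k
      · subst hk; simp
      · have hk' : ¬ (k == o) = true := by
          simp only [beq_iff_eq]
          exact fun he => hk he.symm
        simp [hk, hk']

-- ===== VERDICT (by name: the statement is the Claim_ definition above) =====
theorem make_pseudo_list_spec : Claim_equal_make_pseudo_list := by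
  intro L _ hpre
  unfold Spec_make_pseudo_list make_pseudo_list make_pseudo_list_alt
  -- rewrite A's inner loop
  have hA :
      (fun (pseudo_map : PySem.Dict String (List String)) (p : String × List (String × String)) =>
        L.foldl (fun pm q =>
          if (PySem.Dict.mk q.2).get? "original_instruction" = some p.1 then
            pm.modify p.1 [] (fun l => l ++ [q.1]) else pm) pseudo_map)
      = (fun pm p => if pvMatches L p.1 = [] then pm
          else pm.modify p.1 [] (fun l => l ++ pvMatches L p.1)) := by
    funext pm p
    exact pv_inner_fold L p.1 pm
  rw [hA, pv_outer_fold L L PySem.Dict.empty (fun _ _ => PySem.Dict.contains_empty ..) hpre]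
  rw [show PySem.Dict.empty.items = ([] : List (String × List String)) from rfl, List.nil_append]
  -- both sides are the same filterMap over L
  apply List.filterMap_congr
  intro p _
  rw [pvGroups_eq, pv_groups_contains L PySem.Dict.empty p.1, pv_groups_getD L PySem.Dict.empty p.1]
  by_cases hm : pvMatches L p.1 = [] <;> simp [hm]
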